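-- pv_equiv track=rewrite | github.com/Bigboss25-k22/Lab-GemHunter | src/solvers.py | solve_by_brute_force
-- ===== SOURCE A (Python) =====
-- from typing import List, Tuple
--
-- def solve_by_brute_force(cnf: List[List[int]]) -> List[int]:
--     """Solve CNF using brute force method.
--
--     Try all possible combinations of literals until
--     finding a solution that satisfies all clauses.
--     """
--     all_vars = set()
--     for clause in cnf:
--         for var in clause:
--             all_vars.add(abs(var))
--
--     sorted_vars = sorted(all_vars)
--     num_vars = len(sorted_vars)
--
--     total_assignments = 1 << num_vars
--     for assignment in range(total_assignments):
--         model = []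
--         for i in range(num_vars):
--             if (assignment >> i) & 1:
--                 model.append(sorted_vars[i])
--             else:
--                 model.append(-sorted_vars[i])
--
--         if checking_cnf(cnf, model):
--             return model
--
--     return None
--
-- def checking_clause(clause: List[int], model: List[int]) -> bool:
--     """Check if a clause is satisfied by model.
--
--     A clause is satisfied if at least one literal in clause
--     is true in model. A literal is true if it appears in model
--     with same sign.
--     """
--     for var in clause:
--         if var > 0 and var in model:
--             return True
--         if var < 0 and -var not in model:
--             return True
--     return False
--
-- def checking_cnf(cnf: List[List[int]], model: List[int]) -> bool:
--     """Check if all clauses in CNF are satisfied.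
--
--     CNF is satisfied if all clauses in it are satisfied.
--     """
--     return all(checking_clause(clause, model) for clause in cnf)
-- ===== SOURCE B (Python) =====
-- def solve_by_brute_force(cnf):
--     """Subcube-skipping scan: compile each clause into the bit constraints under
--     which it is falsified, then walk assignment numbers upward, jumping past the
--     whole falsifying subcube of the first falsified clause."""
--     vars_sorted = sorted({abs(v) for c in cnf for v in c})
--     idx = {v: i for i, v in enumerate(vars_sorted)}
--     comp = [[(idx[abs(l)], 0 if l > 0 else 1) for l in clause if l != 0]
--             for clause in cnf]
--     a = 0
--     total = 1 << len(vars_sorted)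
--     while a < total:
--         hit = None
--         for cons in comp:
--             if all((a >> i) & 1 == w for i, w in cons):
--                 hit = cons
--                 break
--         if hit is None:
--             return [v if (a >> i) & 1 else -v for i, v in enumerate(vars_sorted)]
--         if not hit:
--             return None  # a clause with no real literals is false everywhere
--         s = min(i for i, _ in hit)
--         a = ((a >> s) + 1) << s
--     return None
-- ===== Notes on version B (the rewrite author's own statement) =====
-- stated objective: alternative
-- what changed: Replaces A's one-by-one scan of all 2^n assignments (rebuilding and rechecking the full model each time) by a compile-then-jump scan: each clause is compiled once into the bit constraints under which it is falsified, and the scan advances past the entire falsifying subcube of the first falsified clause instead of stepping by one.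
import Mathlib
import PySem

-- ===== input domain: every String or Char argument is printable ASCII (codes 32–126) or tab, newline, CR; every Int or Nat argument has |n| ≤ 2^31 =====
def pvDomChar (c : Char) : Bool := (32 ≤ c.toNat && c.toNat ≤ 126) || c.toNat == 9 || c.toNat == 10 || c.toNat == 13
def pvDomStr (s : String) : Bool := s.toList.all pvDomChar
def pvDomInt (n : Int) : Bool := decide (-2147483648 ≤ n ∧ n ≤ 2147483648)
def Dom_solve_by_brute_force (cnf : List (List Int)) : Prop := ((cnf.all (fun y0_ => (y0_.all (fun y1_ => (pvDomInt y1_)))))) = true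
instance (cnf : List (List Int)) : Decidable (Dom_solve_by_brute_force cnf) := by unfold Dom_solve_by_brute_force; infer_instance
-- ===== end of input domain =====

-- B replaces A's one-by-one scan of all 2^n assignments by a compile-then-jump scan: each clause
-- becomes its unique falsifying bit-pattern, and the walk skips past whole falsified subcubes.

-- ===== PORT A =====
def checking_clause (clause : List Int) (model : List Int) : Bool :=
  match clause with
  | [] => false
  | var :: rest =>
    if var > 0 ∧ var ∈ model then true
    else if var < 0 ∧ ¬ (-var ∈ model) then true
    else checking_clause rest model

def checking_cnf (cnf : List (List Int)) (model : List Int) : Bool :=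
  cnf.all (fun clause => checking_clause clause model)

def solve_by_brute_force (cnf : List (List Int)) : Option (List Int) :=
  let all_vars : PySem.Set Int :=
    cnf.foldl (fun s clause => clause.foldl (fun s v => PySem.Set.add s |v|) s) PySem.Set.empty
  let sorted_vars := PySem.List.sorted all_vars (fun x => x) false
  let num_vars := sorted_vars.length
  let total_assignments := 1 <<< num_vars
  (List.range total_assignments).findSome? (fun assignment =>
    let model := (List.range num_vars).foldl (fun m i =>
      if (assignment >>> i) &&& 1 == 1 then m ++ [sorted_vars.getD i 0]
      else m ++ [-(sorted_vars.getD i 0)]) []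
    if checking_cnf cnf model then some model else none)

-- ===== PORT B =====
-- termination fact for the while-loop port: the jump target is strictly larger
lemma lt_jump_shift (a s : Nat) : a < ((a >>> s) + 1) <<< s := by
  rw [Nat.shiftRight_eq_div_pow, Nat.shiftLeft_eq]
  calc a < a / 2 ^ s * 2 ^ s + 2 ^ s := Nat.lt_div_mul_add (Nat.two_pow_pos s)
    _ = (a / 2 ^ s + 1) * 2 ^ s := by ring

-- the `while a < total` loop of Source B
def scan_loop (comp : List (List (Nat × Nat))) (svars : List Int) (total a : Nat) :
    Option (List Int) :=
  if _h : a < total then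
    match comp.find? (fun cons => cons.all (fun p => (a >>> p.1) &&& 1 == p.2)) with
    | none =>
      -- enumerate indices are nonnegative, so .toNat is exact here
      some ((PySem.List.enumerate svars).map
        (fun p => if (a >>> p.1.toNat) &&& 1 == 1 then p.2 else -p.2))
    | some [] => none
    | some (q :: rest) =>
      let s := (PySem.List.min? ((q :: rest).map (fun p => p.1)) (fun x => x)).getD 0
      scan_loop comp svars total (((a >>> s) + 1) <<< s)
  else none
termination_by total - a
decreasing_by
  have hj := lt_jump_shift a ((PySem.List.min? ((q :: rest).map (fun p => p.1)) (fun x => x)).getD 0)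
  omega

def solve_by_brute_force_alt (cnf : List (List Int)) : Option (List Int) :=
  let vars_sorted := PySem.List.sorted
    (PySem.Set.ofList (cnf.flatMap (fun c => c.map (fun v => |v|)))) (fun x => x) false
  -- idx = {v: i for i, v in enumerate(vars_sorted)}; indices are ≥ 0, kept as Nat (.toNat exact)
  let idx : PySem.Dict Int Nat :=
    (PySem.List.enumerate vars_sorted).foldl (fun d p => d.insert p.2 p.1.toNat) PySem.Dict.empty
  let comp : List (List (Nat × Nat)) := cnf.map (fun clause =>
    (clause.filter (fun l => l ≠ 0)).map
      (fun l => ((idx.get? |l|).getD 0, if 0 < l then (0 : Nat) else 1)))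
  scan_loop comp vars_sorted (1 <<< vars_sorted.length) 0

-- ===== PRECONDITION & SPEC =====
def Spec_solve_by_brute_force (cnf : List (List Int)) (out : Option (List Int)) : Prop := out = solve_by_brute_force_alt cnf
instance (cnf : List (List Int)) (out : Option (List Int)) : Decidable (Spec_solve_by_brute_force cnf out) := by unfold Spec_solve_by_brute_force; infer_instance

-- ===== CLAIM (what is proved, stated in full; the proofs are below) =====
def Claim_equal_solve_by_brute_force : Prop := ∀ (cnf : List (List Int)), Dom_solve_by_brute_force cnf → Spec_solve_by_brute_force cnf (solve_by_brute_force cnf)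

-- ===== LEMMAS AND PROOFS =====

-- helper definitions used only by the proofs
def bitI (a i : Nat) : Bool := (a >>> i) &&& 1 == 1

def buildM (svars : List Int) (k a : Nat) : List Int :=
  (List.range k).map (fun i => if bitI a i then svars.getD i 0 else -(svars.getD i 0))

def GoodVars (svars : List Int) : Prop :=
  svars.Pairwise (· < ·) ∧ ∀ x ∈ svars, 0 ≤ x

def bIdx (svars : List Int) : PySem.Dict Int Nat :=
  (PySem.List.enumerate svars).foldl (fun d p => d.insert p.2 p.1.toNat) PySem.Dict.empty

def idxD (svars : List Int) (v : Int) : Nat := ((bIdx svars).get? v).getD 0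

def consOf (svars : List Int) (clause : List Int) : List (Nat × Nat) :=
  (clause.filter (fun l => l ≠ 0)).map
    (fun l => (idxD svars |l|, if 0 < l then (0 : Nat) else 1))

def falsB (a : Nat) (cons : List (Nat × Nat)) : Bool :=
  cons.all (fun p => (a >>> p.1) &&& 1 == p.2)

lemma findSome?_congr' {α β : Type} (l : List α) (f g : α → Option β)
    (h : ∀ x ∈ l, f x = g x) : l.findSome? f = l.findSome? g := by
  induction l with
  | nil => rfl
  | cons x xs ih =>
    simp only [List.findSome?_cons]
    rw [h x (by simp)]
    cases g x with
    | none => exact ih (fun y hy => h y (by simp [hy]))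
    | some r => rfl

lemma nodup_of_good {svars : List Int} (hg : GoodVars svars) : svars.Nodup :=
  hg.1.imp (fun h => ne_of_lt h)

lemma getD_nonneg {svars : List Int} (hg : GoodVars svars) {j : Nat}
    (hj : j < svars.length) : 0 ≤ svars.getD j 0 := by
  rw [List.getD_eq_getElem svars 0 hj]
  exact hg.2 _ (svars.getElem_mem hj)

lemma bIdx_items (svars : List Int) (hnd : svars.Nodup) :
    (bIdx svars).items = (PySem.List.enumerate svars).map (fun p => (p.2, p.1.toNat)) := by
  unfold bIdx
  have h := PySem.Dict.items_foldl_insert_fresh (PySem.List.enumerate svars)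
    (fun p => p.2) (fun p => p.1.toNat) PySem.Dict.empty
    (fun a _ => PySem.Dict.contains_empty _)
    (by rw [PySem.List.map_snd_enumerate]; exact hnd)
  simpa using h

lemma bIdx_keys_nodup (svars : List Int) : (bIdx svars).keys.Nodup :=
  PySem.Dict.nodup_keys_foldl_insert_key _ _ _ _ PySem.Dict.nodup_keys_empty

lemma idxD_getD (svars : List Int) (hnd : svars.Nodup) {j : Nat} (hj : j < svars.length) :
    idxD svars (svars.getD j 0) = j := by
  unfold idxD
  rw [PySem.Dict.get?_of_mem_items _ ?_ (bIdx_keys_nodup svars)]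
  · rfl
  · rw [bIdx_items svars hnd, List.mem_map]
    refine ⟨((j : Int), svars[j]), (PySem.List.mem_enumerate_iff _ _ _).mpr ⟨j, hj, by simp⟩, ?_⟩
    rw [List.getD_eq_getElem svars 0 hj]
    simp

lemma idxD_spec (svars : List Int) (hnd : svars.Nodup) {v : Int} (hv : v ∈ svars) :
    idxD svars v < svars.length ∧ svars.getD (idxD svars v) 0 = v := by
  obtain ⟨j, hj, rfl⟩ := List.mem_iff_getElem.mp hv
  rw [← List.getD_eq_getElem svars 0 hj, idxD_getD svars hnd hj]
  exact ⟨hj, rfl⟩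

lemma and_one_cases (n : Nat) : n &&& 1 = 0 ∨ n &&& 1 = 1 := by
  rw [Nat.and_one_is_mod]; omega

lemma bitI_false_iff (a i : Nat) : ((a >>> i) &&& 1 == 0) = true ↔ bitI a i = false := by
  rcases and_one_cases (a >>> i) with h | h <;> simp [bitI, h]

lemma bitI_stable {a x s i : Nat} (hs : s ≤ i) (hdiv : x / 2 ^ s = a / 2 ^ s) :
    bitI x i = bitI a i := by
  have hx : x >>> i = x / 2 ^ s / 2 ^ (i - s) := by
    rw [Nat.shiftRight_eq_div_pow, Nat.div_div_eq_div_mul, ← pow_add, Nat.add_sub_cancel' hs]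
  have ha : a >>> i = a / 2 ^ s / 2 ^ (i - s) := by
    rw [Nat.shiftRight_eq_div_pow, Nat.div_div_eq_div_mul, ← pow_add, Nat.add_sub_cancel' hs]
  simp [bitI, hx, ha, hdiv]

lemma and_one_eq_of_bitI_eq {x a i : Nat} (h : bitI x i = bitI a i) :
    (x >>> i) &&& 1 = (a >>> i) &&& 1 := by
  rcases and_one_cases (x >>> i) with h1 | h1 <;> rcases and_one_cases (a >>> i) with h2 | h2 <;>
    simp [bitI, h1, h2] at h ⊢

lemma div_stable {a x s : Nat} (h1 : a ≤ x) (h2 : x < ((a >>> s) + 1) <<< s) :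
    x / 2 ^ s = a / 2 ^ s := by
  rw [Nat.shiftRight_eq_div_pow, Nat.shiftLeft_eq] at h2
  exact Nat.div_eq_of_lt_le (le_trans (Nat.div_mul_le_self a _) h1) h2

lemma mem_buildM {svars : List Int} (hg : GoodVars svars) {x : Int} (hx : 0 < x) (a : Nat) :
    x ∈ buildM svars svars.length a ↔
      ∃ j, ∃ _ : j < svars.length, svars.getD j 0 = x ∧ bitI a j = true := by
  unfold buildM
  rw [List.mem_map]
  constructor
  · rintro ⟨i, hi, hval⟩
    rw [List.mem_range] at hi
    by_cases hb : bitI a i = true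
    · exact ⟨i, hi, by rw [if_pos hb] at hval; exact hval, hb⟩
    · exfalso
      rw [if_neg hb] at hval
      have := getD_nonneg hg hi
      omega
  · rintro ⟨j, hj, hval, hb⟩
    exact ⟨j, List.mem_range.mpr hj, by rw [if_pos hb, hval]⟩

lemma mem_buildM_iff_bit {svars : List Int} (hg : GoodVars svars) {x : Int} (hx : 0 < x)
    (hv : x ∈ svars) (a : Nat) :
    (x ∈ buildM svars svars.length a) ↔ bitI a (idxD svars x) = true := by
  rw [mem_buildM hg hx]
  constructor
  · rintro ⟨j, hj, hgd, hbit⟩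
    have h := idxD_getD svars (nodup_of_good hg) hj
    rw [hgd] at h
    rw [h]
    exact hbit
  · intro hbit
    obtain ⟨hlt, hgd⟩ := idxD_spec svars (nodup_of_good hg) hv
    exact ⟨idxD svars x, hlt, hgd, hbit⟩

lemma checking_clause_eq_any (c m : List Int) :
    checking_clause c m =
      c.any (fun v => (decide (v > 0) && decide (v ∈ m)) || (decide (v < 0) && !decide (-v ∈ m))) := by
  induction c with
  | nil => rfl
  | cons v rest ih =>
    rw [List.any_cons, checking_clause]
    split_ifs with h1 h2 <;> simp_all

lemma checking_eq_falsB {svars : List Int} (hg : GoodVars svars) {c : List Int}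
    (habs : ∀ l ∈ c, |l| ∈ svars) (a : Nat) :
    (checking_clause c (buildM svars svars.length a) = false) ↔
      falsB a (consOf svars c) = true := by
  rw [checking_clause_eq_any, List.any_eq_false]
  unfold falsB consOf
  rw [List.all_eq_true]
  constructor
  · intro hall p hp
    rw [List.mem_map] at hp
    obtain ⟨l, hl, rfl⟩ := hp
    rw [List.mem_filter] at hl
    obtain ⟨hlc, hl0⟩ := hl
    have hl0' : l ≠ 0 := by simpa using hl0
    have h := hall l hlc
    rw [Bool.not_eq_true, Bool.or_eq_false_iff, Bool.and_eq_false_iff, Bool.and_eq_false_iff] at h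
    by_cases hpos : 0 < l
    · have hnm : l ∉ buildM svars svars.length a := by
        rcases h.1 with h' | h'
        · simp at h'; omega
        · simpa using h'
      show ((a >>> (idxD svars |l|)) &&& 1 == (if 0 < l then (0 : Nat) else 1)) = true
      rw [if_pos hpos, bitI_false_iff]
      by_contra hb
      rw [Bool.not_eq_false] at hb
      exact hnm ((mem_buildM_iff_bit hg hpos (by have := habs l hlc; rwa [abs_of_pos hpos] at this) a).mpr
        (by rwa [abs_of_pos hpos] at hb))
    · have hneg : l < 0 := by omega
      have hm : -l ∈ buildM svars svars.length a := by
        rcases h.2 with h' | h'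
        · simp at h'; omega
        · simpa using h'
      show ((a >>> (idxD svars |l|)) &&& 1 == (if 0 < l then (0 : Nat) else 1)) = true
      rw [if_neg hpos]
      have habs' : |l| = -l := abs_of_neg hneg
      rw [habs']
      exact (mem_buildM_iff_bit hg (by omega) (habs' ▸ habs l hlc) a).mp hm
  · intro hall l hlc
    by_cases hl0 : l = 0
    · subst hl0; simp
    have hmemv : |l| ∈ svars := habs l hlc
    have hp : (idxD svars |l|, if 0 < l then (0 : Nat) else 1) ∈
        (c.filter (fun l => l ≠ 0)).map
          (fun l => (idxD svars |l|, if 0 < l then (0 : Nat) else 1)) :=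
      List.mem_map.mpr ⟨l, List.mem_filter.mpr ⟨hlc, by simpa using hl0⟩, rfl⟩
    replace hp : ((a >>> (idxD svars |l|)) &&& 1 == (if 0 < l then (0 : Nat) else 1)) = true :=
      hall _ hp
    by_cases hpos : 0 < l
    · rw [if_pos hpos, bitI_false_iff] at hp
      have hnm : l ∉ buildM svars svars.length a := by
        intro hm
        have := (mem_buildM_iff_bit hg hpos (by rwa [abs_of_pos hpos] at hmemv) a).mp hm
        rw [abs_of_pos hpos] at hp
        simp [this] at hp
      simp [hnm, show ¬(l < 0) from by omega]
    · have hneg : l < 0 := by omega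
      rw [if_neg hpos] at hp
      have habs' : |l| = -l := abs_of_neg hneg
      have hm : -l ∈ buildM svars svars.length a :=
        (mem_buildM_iff_bit hg (by omega) (habs' ▸ hmemv) a).mpr (by rwa [habs'] at hp)
      simp [hm, show ¬(0 < l) from hpos]

lemma comp_sat {cnf : List (List Int)} {svars : List Int} (hg : GoodVars svars)
    (habs : ∀ c ∈ cnf, ∀ l ∈ c, |l| ∈ svars) (a : Nat)
    (hno : ∀ e ∈ cnf.map (consOf svars), falsB a e = false) :
    checking_cnf cnf (buildM svars svars.length a) = true := by
  rw [checking_cnf, List.all_eq_true]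
  intro c hc
  have hmem : consOf svars c ∈ cnf.map (consOf svars) := List.mem_map.mpr ⟨c, hc, rfl⟩
  have := hno _ hmem
  by_contra hcc
  rw [Bool.not_eq_true] at hcc
  rw [(checking_eq_falsB hg (habs c hc) a).mp hcc] at this
  exact absurd this (by simp)

lemma comp_falsified {cnf : List (List Int)} {svars : List Int} (hg : GoodVars svars)
    (habs : ∀ c ∈ cnf, ∀ l ∈ c, |l| ∈ svars) {e : List (Nat × Nat)}
    (he : e ∈ cnf.map (consOf svars)) (a : Nat)
    (hf : falsB a e = true) :
    checking_cnf cnf (buildM svars svars.length a) = false := by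
  obtain ⟨c, hc, rfl⟩ := List.mem_map.mp he
  rw [checking_cnf]
  exact List.all_eq_false.mpr ⟨c, hc, by
    rw [(checking_eq_falsB hg (habs c hc) a).mpr hf]; simp⟩

lemma min_le_fst {q : Nat × Nat} {rest : List (Nat × Nat)} {p : Nat × Nat}
    (hp : p ∈ q :: rest) :
    (PySem.List.min? ((q :: rest).map (fun p => p.1)) (fun x => x)).getD 0 ≤ p.1 := by
  cases hmin : PySem.List.min? ((q :: rest).map (fun p => p.1)) (fun x => x) with
  | none =>
    exfalso
    have := (PySem.List.min?_eq_none_iff _ _).mp hmin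
    simp at this
  | some m =>
    simpa using PySem.List.min?_isMin hmin p.1 (List.mem_map.mpr ⟨p, hp, rfl⟩)

lemma falsB_stable {q : Nat × Nat} {rest : List (Nat × Nat)} {a x : Nat}
    (hf : falsB a (q :: rest) = true) (h1 : a ≤ x)
    (h2 : x < ((a >>> (PySem.List.min? ((q :: rest).map (fun p => p.1)) (fun x => x)).getD 0) + 1)
      <<< (PySem.List.min? ((q :: rest).map (fun p => p.1)) (fun x => x)).getD 0) :
    falsB x (q :: rest) = true := by
  rw [falsB, List.all_eq_true] at hf ⊢
  intro p hp
  have hd := div_stable h1 h2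
  have hb : bitI x p.1 = bitI a p.1 := bitI_stable (min_le_fst hp) hd
  have h := hf p hp
  show ((x >>> p.1) &&& 1 == p.2) = true
  rw [and_one_eq_of_bitI_eq hb]
  exact h

lemma enum_map_buildM (svars : List Int) (a : Nat) :
    (PySem.List.enumerate svars).map
        (fun p => if (a >>> p.1.toNat) &&& 1 == 1 then p.2 else -p.2) =
      buildM svars svars.length a := by
  apply List.ext_getElem
  · simp [buildM, PySem.List.length_enumerate]
  · intro i h1 h2
    have hi : i < svars.length := by simpa [PySem.List.length_enumerate] using h1
    simp only [buildM, List.getElem_map, List.getElem_range, PySem.List.getElem_enumerate]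
    rw [List.getD_eq_getElem svars 0 hi]
    simp [bitI]

lemma findSome?_first {β : Type} (f : Nat → Option β) {N a : Nat} (ha : a < N)
    (hnone : ∀ x, x < a → f x = none) {r : β} (hr : f a = some r) :
    (List.range N).findSome? f = some r := by
  rw [show N = (a + 1) + (N - (a + 1)) from by omega, List.range_add, List.findSome?_append,
    List.range_succ, List.findSome?_append]
  have h1 : (List.range a).findSome? f = none :=
    List.findSome?_eq_none_iff.mpr (fun x hx => hnone x (List.mem_range.mp hx))
  simp [h1, hr]

lemma scan_eq {cnf : List (List Int)} {svars : List Int} (hg : GoodVars svars)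
    (habs : ∀ c ∈ cnf, ∀ l ∈ c, |l| ∈ svars) :
    ∀ (fuel a : Nat), 2 ^ svars.length - a ≤ fuel →
      (∀ x, x < a → checking_cnf cnf (buildM svars svars.length x) = false) →
      scan_loop (cnf.map (consOf svars)) svars
          (2 ^ svars.length) a =
        (List.range (2 ^ svars.length)).findSome? (fun x =>
          if checking_cnf cnf (buildM svars svars.length x) then
            some (buildM svars svars.length x) else none) := by
  intro fuel
  induction fuel with
  | zero =>
    intro a hfu hinv
    rw [scan_loop, dif_neg (by omega)]
    symm
    rw [List.findSome?_eq_none_iff]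
    intro x hx
    rw [hinv x (by have := List.mem_range.mp hx; omega)]
    simp
  | succ fuel ih =>
    intro a hfu hinv
    rw [scan_loop]
    by_cases hlt : a < 2 ^ svars.length
    swap
    · rw [dif_neg hlt]
      symm
      rw [List.findSome?_eq_none_iff]
      intro x hx
      rw [hinv x (by have := List.mem_range.mp hx; omega)]
      simp
    · rw [dif_pos hlt]
      cases hfind : (cnf.map (consOf svars)).find?
          (fun cons => cons.all (fun p => (a >>> p.1) &&& 1 == p.2)) with
      | none =>
        have hno : ∀ e ∈ cnf.map (consOf svars),
            falsB a e = false := by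
          intro e he
          have := List.find?_eq_none.mp hfind e he
          simpa [falsB] using this
        have hsat := comp_sat hg habs a hno
        rw [enum_map_buildM]
        exact (findSome?_first _ hlt (fun x hx => by rw [hinv x hx]; simp)
          (by rw [hsat]; simp)).symm
      | some e =>
        have hmem := List.mem_of_find?_eq_some hfind
        have hfals : falsB a e = true := List.find?_some hfind
        match e, hmem, hfals with
        | [], hmem, hfals =>
          symm
          rw [List.findSome?_eq_none_iff]
          intro x _
          rw [comp_falsified hg habs hmem x (by simp [falsB])]
          simp
        | q :: rest, hmem, hfals =>
          show scan_loop (cnf.map (consOf svars)) svars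
              (2 ^ svars.length)
              (((a >>> (PySem.List.min? ((q :: rest).map (fun p => p.1)) (fun x => x)).getD 0) + 1)
                <<< (PySem.List.min? ((q :: rest).map (fun p => p.1)) (fun x => x)).getD 0) = _
          refine ih _ ?_ ?_
          · have := lt_jump_shift a
              ((PySem.List.min? ((q :: rest).map (fun p => p.1)) (fun x => x)).getD 0)
            omega
          · intro x hx
            by_cases hxa : x < a
            · exact hinv x hxa
            · exact comp_falsified hg habs hmem x (falsB_stable hfals (by omega) hx)

lemma sets_fuse : ∀ (L : List (List Int)) (s : PySem.Set Int),
    L.foldl (fun s clause => clause.foldl (fun s v => PySem.Set.add s |v|) s) s =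
      (L.flatMap fun c => c.map fun v => |v|).foldl PySem.Set.add s := by
  intro L
  induction L with
  | nil => intro s; rfl
  | cons c rest ih =>
    intro s
    rw [List.foldl_cons, List.flatMap_cons, List.foldl_append, List.foldl_map]
    exact ih _

-- ===== VERDICT (by name: the statement is the Claim_ definition above) =====
theorem solve_by_brute_force_spec : Claim_equal_solve_by_brute_force := by
  intro cnf _
  unfold Spec_solve_by_brute_force solve_by_brute_force solve_by_brute_force_alt
  simp only []
  have hA : (cnf.foldl (fun s clause => clause.foldl (fun s v => PySem.Set.add s |v|) s)
      PySem.Set.empty) = PySem.Set.ofList (cnf.flatMap fun c => c.map fun v => |v|) := by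
    rw [PySem.Set.ofList_eq_foldl]
    exact sets_fuse cnf PySem.Set.empty
  rw [hA]
  set svars := PySem.List.sorted (PySem.Set.ofList (cnf.flatMap fun c => c.map fun v => |v|))
      (fun x => x) false with hsv
  have hg : GoodVars svars := by
    constructor
    · rw [hsv]
      exact PySem.List.sorted_ofList_pairwise_lt _
    · intro x hx
      rw [hsv, PySem.List.mem_sorted, PySem.Set.mem_ofList, List.mem_flatMap] at hx
      obtain ⟨c, hc, hx⟩ := hx
      obtain ⟨w, hw, rfl⟩ := List.mem_map.mp hx
      exact abs_nonneg w
  have habs : ∀ c ∈ cnf, ∀ w ∈ c, |w| ∈ svars := by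
    intro c hc w hw
    rw [hsv, PySem.List.mem_sorted, PySem.Set.mem_ofList, List.mem_flatMap]
    exact ⟨c, hc, List.mem_map.mpr ⟨w, hw, rfl⟩⟩
  have hcomp : cnf.map (fun clause =>
      (clause.filter (fun l => l ≠ 0)).map
        (fun l => ((((PySem.List.enumerate svars).foldl
            (fun d p => d.insert p.2 p.1.toNat) PySem.Dict.empty).get? |l|).getD 0,
          if 0 < l then (0 : Nat) else 1))) = cnf.map (consOf svars) := rfl
  rw [hcomp, Nat.one_shiftLeft]
  rw [scan_eq hg habs (2 ^ svars.length) 0 (Nat.sub_le _ _) (fun x hx => absurd hx (Nat.not_lt_zero x))]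
  apply findSome?_congr'
  intro a _
  have hfold : (List.range svars.length).foldl (fun m i =>
      if (a >>> i) &&& 1 == 1 then m ++ [svars.getD i 0] else m ++ [-(svars.getD i 0)]) [] =
      buildM svars svars.length a := by
    rw [show (fun (m : List Int) (i : Nat) =>
        if (a >>> i) &&& 1 == 1 then m ++ [svars.getD i 0] else m ++ [-(svars.getD i 0)]) =
        fun (m : List Int) (i : Nat) =>
          m ++ [if bitI a i then svars.getD i 0 else -(svars.getD i 0)] from by
      funext m i
      simp only [bitI]
      split <;> rfl]
    rw [PySem.List.foldl_append_singleton_eq_map]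
    simp [buildM]
  rw [hfold]
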